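-- pv_equiv track=rewrite | github.com/Ananta-dot/misr_new | save_every_round.py | covers_grid_closed
-- ===== SOURCE A (Python) =====
-- from typing import Dict, List, Tuple, Optional
--
-- Rect = Tuple[Tuple[int,int], Tuple[int,int]]  # ((x1,x2),(y1,y2)) with x1<=x2, y1<=y2
--
-- Point = Tuple[int,int]
--
-- def covers_grid_closed(rects: List[Rect], pts: List[Point]) -> Tuple[List[List[int]], List[List[int]]]:
--     """
--     Returns:
--         covers: list over constraints p, each is list of rect indices covering p
--         rect_to_constr: list over rect i, each is list of constraint indices p covered by rect i
--     """
--     covers: List[List[int]] = []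
--     rect_to_constr: List[List[int]] = [[] for _ in rects]
--     for p_idx, (x,y) in enumerate(pts):
--         S=[]
--         for i,((x1,x2),(y1,y2)) in enumerate(rects):
--             if (x1 <= x <= x2) and (y1 <= y <= y2):
--                 S.append(i)
--         covers.append(S)
--         for i in S:
--             rect_to_constr[i].append(p_idx)
--     return covers, rect_to_constr
-- ===== SOURCE B (Python) =====
-- def covers_grid_closed(rects, pts):
--     # Transposed, mutation-free formulation: each output is computed directly
--     # by its own comprehension (point-major for covers, rect-major for rect_to_constr).
--     covers = [[i for i, ((x1, x2), (y1, y2)) in enumerate(rects)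
--                if x1 <= x <= x2 and y1 <= y <= y2]
--               for (x, y) in pts]
--     rect_to_constr = [[p for p, (x, y) in enumerate(pts)
--                        if x1 <= x <= x2 and y1 <= y <= y2]
--                       for ((x1, x2), (y1, y2)) in rects]
--     return covers, rect_to_constr
-- ===== Notes on version B (the rewrite author's own statement) =====
-- stated objective: simpler
-- what changed: A builds both outputs in one point-major loop that mutates rect_to_constr by indexed in-place appends; B computes each output directly with its own mutation-free comprehension (point-major for covers, a transposed rect-major pass for rect_to_constr).
import Mathlib
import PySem

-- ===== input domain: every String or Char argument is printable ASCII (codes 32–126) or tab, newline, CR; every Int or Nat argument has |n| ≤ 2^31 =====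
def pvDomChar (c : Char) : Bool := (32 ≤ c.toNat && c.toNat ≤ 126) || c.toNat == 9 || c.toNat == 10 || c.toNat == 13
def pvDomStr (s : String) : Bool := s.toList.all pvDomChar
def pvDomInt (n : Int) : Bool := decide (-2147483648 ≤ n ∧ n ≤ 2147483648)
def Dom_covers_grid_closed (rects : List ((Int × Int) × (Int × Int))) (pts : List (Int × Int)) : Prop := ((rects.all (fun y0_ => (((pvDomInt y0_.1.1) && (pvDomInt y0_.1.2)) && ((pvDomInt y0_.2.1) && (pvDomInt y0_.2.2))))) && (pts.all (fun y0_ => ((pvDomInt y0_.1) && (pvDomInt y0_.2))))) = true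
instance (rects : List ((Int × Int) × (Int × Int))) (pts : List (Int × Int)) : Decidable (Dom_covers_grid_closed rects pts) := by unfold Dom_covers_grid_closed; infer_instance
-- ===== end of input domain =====

-- B replaces A's single point-major loop that mutates rect_to_constr by two independent,
-- mutation-free transposed comprehensions (point-major for covers, rect-major for
-- rect_to_constr); objective: simpler (no indexed in-place updates), same exact outputs.

-- ===== PORT A =====
-- A: one loop over enumerate(pts); per point build S by scanning enumerate(rects),
-- append S to covers, then for i in S append p_idx into rect_to_constr[i] (in-place).
def covers_grid_closed (rects : List ((Int × Int) × (Int × Int))) (pts : List (Int × Int)) : List (List Int) × List (List Int) :=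
  (PySem.List.enumerate pts 0).foldl
    (fun (st : List (List Int) × List (List Int)) pp =>
      let S : List Int := (PySem.List.enumerate rects 0).foldl
        (fun S ir =>
          if ir.2.1.1 ≤ pp.2.1 ∧ pp.2.1 ≤ ir.2.1.2 ∧ ir.2.2.1 ≤ pp.2.2 ∧ pp.2.2 ≤ ir.2.2.2
          then S ++ [ir.1] else S) []
      (st.1 ++ [S], S.foldl (fun m i => m.modify i.toNat (fun l => l ++ [pp.1])) st.2))
    ([], rects.map (fun _ => []))

-- ===== PORT B =====
-- B: covers and rect_to_constr each computed directly by its own comprehension.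
def covers_grid_closed_alt (rects : List ((Int × Int) × (Int × Int))) (pts : List (Int × Int)) : List (List Int) × List (List Int) :=
  (pts.map (fun q =>
      ((PySem.List.enumerate rects 0).filter (fun ir =>
        decide (ir.2.1.1 ≤ q.1 ∧ q.1 ≤ ir.2.1.2 ∧ ir.2.2.1 ≤ q.2 ∧ q.2 ≤ ir.2.2.2))).map (·.1)),
   rects.map (fun r =>
      ((PySem.List.enumerate pts 0).filter (fun pq =>
        decide (r.1.1 ≤ pq.2.1 ∧ pq.2.1 ≤ r.1.2 ∧ r.2.1 ≤ pq.2.2 ∧ pq.2.2 ≤ r.2.2))).map (·.1)))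

-- ===== PRECONDITION & SPEC =====
def Spec_covers_grid_closed (rects : List ((Int × Int) × (Int × Int))) (pts : List (Int × Int)) (out : List (List Int) × List (List Int)) : Prop := out = covers_grid_closed_alt rects pts
instance (rects : List ((Int × Int) × (Int × Int))) (pts : List (Int × Int)) (out : List (List Int) × List (List Int)) : Decidable (Spec_covers_grid_closed rects pts out) := by unfold Spec_covers_grid_closed; infer_instance

-- ===== CLAIM (what is proved, stated in full; the proofs are below) =====
def Claim_equal_covers_grid_closed : Prop := ∀ (rects : List ((Int × Int) × (Int × Int))) (pts : List (Int × Int)), Dom_covers_grid_closed rects pts → Spec_covers_grid_closed rects pts (covers_grid_closed rects pts)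

-- ===== LEMMAS AND PROOFS =====

-- cover test, Bool form
def covB (r : (Int × Int) × (Int × Int)) (q : Int × Int) : Bool :=
  decide (r.1.1 ≤ q.1 ∧ q.1 ≤ r.1.2 ∧ r.2.1 ≤ q.2 ∧ q.2 ≤ r.2.2)

-- B's two comprehensions, named
def ffun (rects : List ((Int × Int) × (Int × Int))) (q : Int × Int) : List Int :=
  ((PySem.List.enumerate rects 0).filter (fun ir => covB ir.2 q)).map (·.1)

def gfun (pts : List (Int × Int)) (r : (Int × Int) × (Int × Int)) : List Int :=
  ((PySem.List.enumerate pts 0).filter (fun pq => covB r pq.2)).map (·.1)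

theorem alt_eq (rects : List ((Int × Int) × (Int × Int))) (pts : List (Int × Int)) :
    covers_grid_closed_alt rects pts = (pts.map (ffun rects), rects.map (gfun pts)) := rfl

theorem modify_append_cons {α : Type} (pre : List α) (x : α) (l : List α) (f : α → α) :
    (pre ++ x :: l).modify pre.length f = pre ++ f x :: l := by
  induction pre with
  | nil => simp [List.modify]
  | cons a t ih => simpa [List.modify] using ih

-- the inner S of A's loop is B's per-point comprehension
theorem S_eq (rects : List ((Int × Int) × (Int × Int))) (q : Int × Int) :
    ((PySem.List.enumerate rects 0).foldl
        (fun S ir =>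
          if ir.2.1.1 ≤ q.1 ∧ q.1 ≤ ir.2.1.2 ∧ ir.2.2.1 ≤ q.2 ∧ q.2 ≤ ir.2.2.2
          then S ++ [ir.1] else S) ([] : List Int)) = ffun rects q := by
  have h : (fun (S : List Int) (ir : Int × ((Int × Int) × (Int × Int))) =>
      if ir.2.1.1 ≤ q.1 ∧ q.1 ≤ ir.2.1.2 ∧ ir.2.2.1 ≤ q.2 ∧ q.2 ≤ ir.2.2.2
      then S ++ [ir.1] else S)
      = (fun S ir => if covB ir.2 q then S ++ [ir.1] else S) := by
    funext S ir; simp [covB]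
  rw [h, PySem.List.foldl_append_if]
  simp [ffun]

-- A's 'for i in S: rect_to_constr[i].append(p_idx)' over a state of shape pre ++ rs.map h
theorem rtc_fold (c : ((Int × Int) × (Int × Int)) → Bool) (f : List Int → List Int) :
    ∀ (rs : List ((Int × Int) × (Int × Int))) (pre : List (List Int))
      (h : ((Int × Int) × (Int × Int)) → List Int),
    ((((PySem.List.enumerate rs (pre.length : Int)).filter (fun ir => c ir.2)).map (·.1)).foldl
        (fun m i => m.modify i.toNat f) (pre ++ rs.map h))
      = pre ++ rs.map (fun r => if c r then f (h r) else h r) := by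
  intro rs
  induction rs with
  | nil => intro pre h; simp [PySem.List.enumerate_nil]
  | cons r rs ih =>
    intro pre h
    rw [PySem.List.enumerate_cons]
    by_cases hc : c r = true
    · have key : ((pre ++ h r :: rs.map h).modify ((pre.length : Int)).toNat f)
          = (pre ++ [f (h r)]) ++ rs.map h := by
        simp only [Int.toNat_natCast]
        rw [modify_append_cons]
        simp
      have hstart : (pre.length : Int) + 1 = (((pre ++ [f (h r)]).length : Int)) := by simp
      simp only [List.filter_cons, hc, if_true, List.map_cons, List.foldl_cons, key, hstart]
      rw [ih (pre ++ [f (h r)]) h]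
      simp
    · have hstate : pre ++ h r :: rs.map h = (pre ++ [h r]) ++ rs.map h := by simp
      have hstart : (pre.length : Int) + 1 = (((pre ++ [h r]).length : Int)) := by simp
      simp only [List.filter_cons, hc, Bool.false_eq_true, if_false, List.map_cons,
        hstate, hstart]
      rw [ih (pre ++ [h r]) h]
      simp

-- per-rect comprehension after appending one point
theorem gfun_snoc (pts : List (Int × Int)) (q : Int × Int) :
    (fun r => if covB r q then gfun pts r ++ [(pts.length : Int)] else gfun pts r)
      = gfun (pts ++ [q]) := by
  funext r
  simp only [gfun, PySem.List.enumerate_append, List.filter_append, List.map_append,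
    PySem.List.enumerate_cons, PySem.List.enumerate_nil, List.filter_cons]
  by_cases hc : covB r q = true <;> simp [hc]

theorem ports_eq (rects : List ((Int × Int) × (Int × Int))) (pts : List (Int × Int)) :
    covers_grid_closed rects pts = covers_grid_closed_alt rects pts := by
  rw [alt_eq]
  induction pts using List.reverseRecOn with
  | nil =>
    have hg : gfun ([] : List (Int × Int)) = fun _ => ([] : List Int) := by
      funext r; simp [gfun, PySem.List.enumerate_nil]
    simp [covers_grid_closed, PySem.List.enumerate_nil, hg]
  | append_singleton ps q ih =>
    have snoc : covers_grid_closed rects (ps ++ [q])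
        = ((covers_grid_closed rects ps).1 ++ [ffun rects q],
           (ffun rects q).foldl (fun m i => m.modify i.toNat (fun l => l ++ [(ps.length : Int)]))
             (covers_grid_closed rects ps).2) := by
      simp only [covers_grid_closed, PySem.List.enumerate_append, List.foldl_append,
        PySem.List.enumerate_cons, PySem.List.enumerate_nil, List.foldl_cons, List.foldl_nil,
        zero_add, S_eq]
    rw [snoc, ih]
    have t := rtc_fold (fun r => covB r q) (fun l => l ++ [(ps.length : Int)]) rects [] (gfun ps)
    simp only [Prod.mk.injEq]
    refine ⟨by simp, ?_⟩
    exact t.trans (congrArg (fun f => List.map f rects) (gfun_snoc ps q))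

-- ===== VERDICT (by name: the statement is the Claim_ definition above) =====
theorem covers_grid_closed_spec : Claim_equal_covers_grid_closed := by
  intro rects pts _
  unfold Spec_covers_grid_closed
  exact ports_eq rects pts
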